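-- pv_equiv track=rewrite | github.com/MichaelHeUVA/Leetcode | Unsorted Problems/Hard/2514. Count Anagrams.py | countAnagrams
-- ===== SOURCE A (Python) =====
-- from collections import Counter
-- from math import factorial
--
-- def countAnagrams(s: str) -> int:
--     words = s.split(" ")
--     ans = 1
--     for word in words:
--         numerator = factorial(len(word))
--         w_map = Counter(word)
--         denominator = 1
--         for value in w_map.values():
--             denominator *= factorial(value)
--         ans *= numerator // denominator % (10**9 + 7)
--
--     return ans % (10**9 + 7)
-- ===== SOURCE B (Python) =====
-- def countAnagrams(s: str) -> int:
--     # Per word: incremental product of binomials (perm * i // cnt[ch] is always exact),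
--     # no factorials and no big quotient; reduce mod p after each word.
--     MOD = 10**9 + 7
--     ans = 1
--     for word in s.split(" "):
--         cnt = {}
--         i = 0
--         perm = 1
--         for ch in word:
--             cnt[ch] = cnt.get(ch, 0) + 1
--             i += 1
--             perm = perm * i // cnt[ch]
--         ans = ans * perm % MOD
--     return ans
-- ===== Notes on version B (the rewrite author's own statement) =====
-- stated objective: alternative
-- what changed: Per word, B replaces factorial(len)//product(factorial(count)) by a single scan that multiplies in an always-exact binomial step (perm = perm * i // cnt[ch]) and reduces the answer mod 1e9+7 after each word instead of once at the end.
import Mathlib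
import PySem

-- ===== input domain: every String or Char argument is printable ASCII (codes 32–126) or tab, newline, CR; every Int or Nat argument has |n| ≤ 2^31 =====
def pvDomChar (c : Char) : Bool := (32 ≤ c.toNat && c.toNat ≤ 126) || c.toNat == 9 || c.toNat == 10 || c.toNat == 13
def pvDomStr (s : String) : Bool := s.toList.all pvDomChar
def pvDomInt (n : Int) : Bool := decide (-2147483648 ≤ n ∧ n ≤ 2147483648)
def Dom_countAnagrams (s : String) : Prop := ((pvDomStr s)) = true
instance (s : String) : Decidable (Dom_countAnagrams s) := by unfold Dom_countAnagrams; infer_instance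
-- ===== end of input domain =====

-- B replaces per-word factorials and one big exact division by an incremental product of
-- binomials (perm * i // cnt[ch], always exact) and reduces mod 1e9+7 after each word;
-- objective: alternative (no big factorial/quotient per word), same return value.

-- ===== PORT A =====
-- math.factorial, ported for the nonnegative arguments A feeds it (word lengths and counts)
def pyFactorial (n : Int) : Int := (Nat.factorial n.toNat : Int)

def countAnagrams (s : String) : Int :=
  let words := (PySem.Str.split? s " ").getD []   -- s.split(" "); sep ≠ "" so split? is never none
  let ans := words.foldl (fun ans word =>
    let numerator := pyFactorial (PySem.Str.len word)
    let wmap := PySem.Dict.counter word.toList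
    let denominator := wmap.values.foldl (fun d v => d * pyFactorial v) 1
    ans * PySem.Int.mod (PySem.Int.floordiv numerator denominator) (10^9+7)) 1
  PySem.Int.mod ans (10^9+7)

-- ===== PORT B =====
-- body of B's inner loop: cnt[ch] = cnt.get(ch, 0) + 1; i += 1; perm = perm * i // cnt[ch]
def altStep (st : PySem.Dict Char Int × Int × Int) (ch : Char) : PySem.Dict Char Int × Int × Int :=
  let cnt := st.1.insert ch (st.1.getD ch 0 + 1)
  let i := st.2.1 + 1
  (cnt, i, PySem.Int.floordiv (st.2.2 * i) (cnt.getD ch 0))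

def countAnagrams_alt (s : String) : Int :=
  ((PySem.Str.split? s " ").getD []).foldl (fun ans word =>
    let r := word.toList.foldl altStep (PySem.Dict.empty, 0, 1)
    PySem.Int.mod (ans * r.2.2) (10^9+7)) 1

-- ===== PRECONDITION & SPEC =====
def Spec_countAnagrams (s : String) (out : Int) : Prop := out = countAnagrams_alt s
instance (s : String) (out : Int) : Decidable (Spec_countAnagrams s out) := by unfold Spec_countAnagrams; infer_instance

-- ===== CLAIM (what is proved, stated in full; the proofs are below) =====
def Claim_equal_countAnagrams : Prop := ∀ (s : String), Dom_countAnagrams s → Spec_countAnagrams s (countAnagrams s)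

-- ===== LEMMAS AND PROOFS =====

-- the exact denominator of a word, as a Finset product of factorials of letter counts
def Dfin (w : List Char) : Nat := ∏ c ∈ w.toFinset, (w.count c).factorial
-- the exact number of anagrams of a word (the multinomial coefficient)
def Mnat (w : List Char) : Nat := w.length.factorial / Dfin w

theorem Dfin_pos (w : List Char) : 0 < Dfin w := by
  apply Finset.prod_pos; intro c _; exact Nat.factorial_pos _

theorem Dfin_dvd (w : List Char) : Dfin w ∣ w.length.factorial := by
  have h := Nat.prod_factorial_dvd_factorial_sum w.toFinset (fun c => w.count c)
  rwa [List.sum_toFinset_count_eq_length] at h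

theorem count_single_ne (c x : Char) (h : c ≠ x) : List.count c [x] = 0 := by
  rw [List.count_singleton]
  simp only [beq_iff_eq, ite_eq_right_iff]
  intro he; exact absurd he.symm h

theorem Dfin_append (w : List Char) (x : Char) :
    Dfin (w ++ [x]) = Dfin w * (w.count x + 1) := by
  unfold Dfin
  by_cases hx : x ∈ w.toFinset
  · have hfin : (w ++ [x]).toFinset = w.toFinset := by
      ext c; simp [List.mem_toFinset]
      intro hc; subst hc; simpa using hx
    rw [hfin, ← Finset.mul_prod_erase _ (fun c => ((w ++ [x]).count c).factorial) hx,
        ← Finset.mul_prod_erase _ (fun c => (w.count c).factorial) hx]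
    have hstep : ∀ c ∈ w.toFinset.erase x, ((w ++ [x]).count c).factorial = (w.count c).factorial := by
      intro c hc
      have hne : c ≠ x := (Finset.mem_erase.mp hc).1
      simp [List.count_append, count_single_ne c x hne]
    rw [Finset.prod_congr rfl hstep]
    have hcx : (w ++ [x]).count x = w.count x + 1 := by simp [List.count_append]
    rw [hcx, Nat.factorial_succ]
    ring
  · have hcx0 : w.count x = 0 := by
      rw [List.count_eq_zero]
      intro h; exact hx (List.mem_toFinset.mpr h)
    have hfin : (w ++ [x]).toFinset = insert x w.toFinset := by
      ext c; simp [List.mem_toFinset]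
    rw [hfin, Finset.prod_insert hx]
    have hstep : ∀ c ∈ w.toFinset, ((w ++ [x]).count c).factorial = (w.count c).factorial := by
      intro c hc
      have hne : c ≠ x := by rintro rfl; exact hx hc
      simp [List.count_append, count_single_ne c x hne]
    rw [Finset.prod_congr rfl hstep]
    have hcx : (w ++ [x]).count x = w.count x + 1 := by simp [List.count_append]
    rw [hcx, hcx0]
    simp

theorem Mnat_append (w : List Char) (x : Char) :
    Mnat (w ++ [x]) = Mnat w * (w.length + 1) / (w.count x + 1) := by
  obtain ⟨q, hq⟩ := Dfin_dvd w
  have hD : 0 < Dfin w := Dfin_pos w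
  have hq' : Mnat w = q := by unfold Mnat; rw [hq, Nat.mul_div_cancel_left _ hD]
  rw [hq']
  unfold Mnat
  have hlen : (w ++ [x]).length = w.length + 1 := by simp
  rw [hlen, Dfin_append, Nat.factorial_succ, hq]
  have h2 : (w.length + 1) * (Dfin w * q) = Dfin w * (q * (w.length + 1)) := by ring
  rw [h2, Nat.mul_div_mul_left _ _ hD]

-- invariant of B's inner loop: the dict is Counter(prefix), i its length, perm the multinomial
theorem alt_fold (w : List Char) :
    w.foldl altStep (PySem.Dict.empty, 0, 1)
      = (PySem.Dict.counter w, (w.length : Int), (Mnat w : Int)) := by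
  induction w using List.reverseRecOn with
  | nil => simp [Mnat, Dfin]; rfl
  | append_singleton w x ih =>
      rw [List.foldl_append, ih]
      have hdict : (PySem.Dict.counter w).insert x ((PySem.Dict.counter w).getD x 0 + 1)
          = PySem.Dict.counter (w ++ [x]) := by
        rw [← PySem.Dict.foldl_insert_getD_add_one_eq_counter w,
            ← PySem.Dict.foldl_insert_getD_add_one_eq_counter (w ++ [x]), List.foldl_append]
        rfl
      simp only [altStep, List.foldl_cons, List.foldl_nil]
      refine Prod.ext ?_ (Prod.ext ?_ ?_)
      · simpa using hdict
      · simp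
      · simp only [hdict]
        rw [PySem.Dict.getD_counter]
        have hc : ((w ++ [x]).count x : Int) = ((w.count x + 1 : Nat) : Int) := by
          simp [List.count_append]
        rw [hc]
        have hm : (Mnat w : Int) * ((w.length : Int) + 1) = ((Mnat w * (w.length + 1) : Nat) : Int) := by
          push_cast; ring
        rw [hm, PySem.Int.floordiv_natCast, Mnat_append]

-- A's denominator loop over Counter(word).values computes Dfin
theorem denom_eq (w : List Char) :
    (PySem.Dict.counter w).values.foldl (fun d v => d * (Nat.factorial v.toNat : Int)) 1
      = (Dfin w : Int) := by
  rw [PySem.Dict.values_eq_map_keys _ (PySem.Dict.nodup_keys_counter w) 0, PySem.Dict.keys_counter]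
  have hfold : ∀ (l : List Char) (g : Char → Int), l.foldl (fun d v => d * g v) 1 = (l.map g).prod := by
    intro l g; rw [List.prod_eq_foldl, List.foldl_map]
  rw [List.foldl_map, hfold]
  have hmap : (PySem.Set.ofList w).map
        (fun k => (Nat.factorial ((PySem.Dict.counter w).getD k 0).toNat : Int))
      = (PySem.Set.ofList w).map (fun k => (((w.count k).factorial : Nat) : Int)) := by
    apply List.map_congr_left
    intro k _
    rw [PySem.Dict.getD_counter]
    simp
  rw [hmap]
  rw [← List.prod_toFinset (fun k => (((w.count k).factorial : Nat) : Int)) (PySem.Set.nodup_ofList w)]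
  have hfin : (PySem.Set.ofList w).toFinset = w.toFinset := by
    ext c; simp [List.mem_toFinset, PySem.Set.mem_ofList]
  rw [hfin]
  unfold Dfin
  push_cast
  rfl

-- A's per-word factor is the multinomial reduced mod p
theorem Aword (word : String) :
    PySem.Int.mod (PySem.Int.floordiv (pyFactorial (PySem.Str.len word))
        ((PySem.Dict.counter word.toList).values.foldl (fun d v => d * pyFactorial v) 1)) (10^9+7)
      = PySem.Int.mod ((Mnat word.toList : Int)) (10^9+7) := by
  have h1 : pyFactorial (PySem.Str.len word) = ((word.toList.length.factorial : Nat) : Int) := by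
    simp [pyFactorial, PySem.Str.len_eq]
  have h2 : (fun (d v : Int) => d * pyFactorial v)
      = (fun d (v : Int) => d * (Nat.factorial v.toNat : Int)) := rfl
  rw [h1, h2, denom_eq, PySem.Int.floordiv_natCast]
  rfl

theorem mod_swap (a b : Int) :
    PySem.Int.mod (a * PySem.Int.mod b (10^9+7)) (10^9+7)
      = PySem.Int.mod (PySem.Int.mod a (10^9+7) * b) (10^9+7) := by
  have hP : (0:Int) < 10^9+7 := by norm_num
  simp only [PySem.Int.mod_eq_emod_of_pos (b := (10^9+7:Int)) hP]
  conv_lhs => rw [Int.mul_emod, Int.emod_emod_of_dvd _ dvd_rfl, ← Int.mul_emod]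
  conv_rhs => rw [Int.mul_emod, Int.emod_emod_of_dvd _ dvd_rfl, ← Int.mul_emod]

-- deferred reduction (A) and per-step reduction (B) of a product agree mod p
theorem mod_fold (ws : List String) (f : String → Int) : ∀ (a : Int),
    PySem.Int.mod (ws.foldl (fun acc w => acc * PySem.Int.mod (f w) (10^9+7)) a) (10^9+7)
      = ws.foldl (fun acc w => PySem.Int.mod (acc * f w) (10^9+7)) (PySem.Int.mod a (10^9+7)) := by
  induction ws with
  | nil => intro a; rfl
  | cons w ws ih =>
      intro a
      rw [List.foldl_cons, List.foldl_cons, ih, mod_swap]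

-- ===== VERDICT (by name: the statement is the Claim_ definition above) =====
theorem countAnagrams_spec : Claim_equal_countAnagrams := by
  intro s _
  unfold Spec_countAnagrams countAnagrams countAnagrams_alt
  simp only []
  have hA : (fun (ans : Int) (word : String) =>
      ans * PySem.Int.mod (PySem.Int.floordiv (pyFactorial (PySem.Str.len word))
        ((PySem.Dict.counter word.toList).values.foldl (fun d v => d * pyFactorial v) 1)) (10^9+7))
      = fun ans word => ans * PySem.Int.mod ((Mnat word.toList : Int)) (10^9+7) := by
    funext ans word; rw [Aword]
  have hB : (fun (ans : Int) (word : String) =>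
      PySem.Int.mod (ans * (word.toList.foldl altStep (PySem.Dict.empty, 0, 1)).2.2) (10^9+7))
      = fun ans word => PySem.Int.mod (ans * (Mnat word.toList : Int)) (10^9+7) := by
    funext ans word; rw [alt_fold]
  rw [hA, hB, mod_fold]
  norm_num
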